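-- pv_equiv track=rewrite | github.com/AIQ-Kitware/helm_audit | dev/oneoff/dedupe_old_eee_conversions.py | _path_matches_paper_scope
-- ===== SOURCE A (Python) =====
-- _PAPER_MODEL_SLUGS: tuple[str, ...] = (
--     "eleutherai_pythia-2.8b-v0",
--     "eleutherai_pythia-6.9b",
--     "lmsys_vicuna-7b-v1.3",
--     "qwen_qwen2.5-7b-instruct-turbo",
--     "openai_gpt-oss-20b",
-- )
--
-- _PAPER_BENCHMARK_PREFIXES: tuple[str, ...] = (
--     # Pythia / Vicuna heatmap (14 families)
--     "boolq",
--     "civil_comments",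
--     "entity_data_imputation",
--     "entity_matching",
--     "gsm",
--     "imdb",
--     "lsat_qa",
--     "mmlu",   # also covers mmlu:subject=... ; mmlu_pro is a *different* prefix below
--     "narrative_qa",
--     "narrativeqa",  # belt-and-suspenders for the EEE typo'd name
--     "quac",
--     "synthetic_reasoning",
--     "synthetic_reasoning_natural",
--     "sythetic_reasoning_natural",  # the well-known dataset-name typo we preserve
--     "truthful_qa",
--     "wikifact",
--     # Qwen lite v1.9.0 add-ons (already partially covered above)
--     "commonsense",
--     "legalbench",
--     "math",
--     "med_qa",
--     "natural_qa",
--     "wmt_14",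
--     # gpt-oss capabilities/safety
--     "ifeval",
--     "mmlu_pro",
--     "bbq",
-- )
--
-- def _path_matches_paper_scope(run_dir_name: str) -> bool:
--     """Return True if ``run_dir_name`` (e.g.
--     ``mmlu:subject=us_foreign_policy,...,model=eleutherai_pythia-6.9b,...``)
--     targets a paper-scope (model, benchmark) combination.
--     """
--     # Run dir names start with the benchmark followed by ':'; we
--     # match the prefix up to the first ':' or ',' (whichever ends the
--     # benchmark name). For benchmarks whose canonical name *contains*
--     # a comma (e.g. ``legal_support,method=...``) we still match the
--     # literal benchmark prefix because we check ``startswith``.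
--     name = run_dir_name
--     bench_ok = any(
--         name == prefix
--         or name.startswith(f"{prefix}:")
--         or name.startswith(f"{prefix},")
--         for prefix in _PAPER_BENCHMARK_PREFIXES
--     )
--     if not bench_ok:
--         return False
--     # Model match: slug appears anywhere after the benchmark prefix.
--     model_ok = any(slug in name for slug in _PAPER_MODEL_SLUGS)
--     return model_ok
-- ===== SOURCE B (Python) =====
-- _PAPER_MODEL_SLUGS: tuple[str, ...] = (
--     "eleutherai_pythia-2.8b-v0",
--     "eleutherai_pythia-6.9b",
--     "lmsys_vicuna-7b-v1.3",
--     "qwen_qwen2.5-7b-instruct-turbo",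
--     "openai_gpt-oss-20b",
-- )
--
-- _PAPER_BENCHMARK_PREFIXES: tuple[str, ...] = (
--     "boolq",
--     "civil_comments",
--     "entity_data_imputation",
--     "entity_matching",
--     "gsm",
--     "imdb",
--     "lsat_qa",
--     "mmlu",
--     "narrative_qa",
--     "narrativeqa",
--     "quac",
--     "synthetic_reasoning",
--     "synthetic_reasoning_natural",
--     "sythetic_reasoning_natural",
--     "truthful_qa",
--     "wikifact",
--     "commonsense",
--     "legalbench",
--     "math",
--     "med_qa",
--     "natural_qa",
--     "wmt_14",
--     "ifeval",
--     "mmlu_pro",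
--     "bbq",
-- )
--
-- _BENCH_SET = set(_PAPER_BENCHMARK_PREFIXES)
--
--
-- def _path_matches_paper_scope(run_dir_name: str) -> bool:
--     # Extract the benchmark token: everything before the first ':' or ','
--     # (whichever comes first), or the whole name if neither occurs.
--     token = run_dir_name
--     for j, ch in enumerate(run_dir_name):
--         if ch == ':' or ch == ',':
--             token = run_dir_name[:j]
--             break
--     if token not in _BENCH_SET:
--         return False
--     return any(slug in run_dir_name for slug in _PAPER_MODEL_SLUGS)
-- ===== Notes on version B (the rewrite author's own statement) =====
-- stated objective: simpler
-- what changed: Instead of looping startswith over all 25 benchmark prefixes, B extracts the benchmark token (the substring before the first ':' or ',', or the whole name) in one scan and tests it with a single set-membership lookup; the model-slug substring scan is kept.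
import Mathlib
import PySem

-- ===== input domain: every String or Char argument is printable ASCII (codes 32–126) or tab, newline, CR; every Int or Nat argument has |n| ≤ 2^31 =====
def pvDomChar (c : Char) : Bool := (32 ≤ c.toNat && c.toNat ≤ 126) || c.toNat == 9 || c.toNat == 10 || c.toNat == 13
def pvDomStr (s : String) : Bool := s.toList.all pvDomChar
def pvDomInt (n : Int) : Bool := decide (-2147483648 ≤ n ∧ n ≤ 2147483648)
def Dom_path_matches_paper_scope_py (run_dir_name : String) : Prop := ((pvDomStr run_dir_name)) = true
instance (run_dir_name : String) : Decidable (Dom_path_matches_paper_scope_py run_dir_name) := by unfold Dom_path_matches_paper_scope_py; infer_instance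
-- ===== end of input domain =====

-- B replaces the loop of startswith tests over all 25 benchmark prefixes by a single
-- token extraction (the name up to the first ':' or ',') plus one set-membership lookup
-- (objective: simpler); the model-slug substring scan is unchanged.


-- ===== PORT A =====
def pvPaperModelSlugsA : List String :=
  ["eleutherai_pythia-2.8b-v0", "eleutherai_pythia-6.9b", "lmsys_vicuna-7b-v1.3",
   "qwen_qwen2.5-7b-instruct-turbo", "openai_gpt-oss-20b"]

def pvPaperBenchmarkPrefixesA : List String :=
  ["boolq", "civil_comments", "entity_data_imputation", "entity_matching", "gsm", "imdb",
   "lsat_qa", "mmlu", "narrative_qa", "narrativeqa", "quac", "synthetic_reasoning",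
   "synthetic_reasoning_natural", "sythetic_reasoning_natural", "truthful_qa", "wikifact",
   "commonsense", "legalbench", "math", "med_qa", "natural_qa", "wmt_14", "ifeval",
   "mmlu_pro", "bbq"]

def path_matches_paper_scope_py (run_dir_name : String) : Bool :=
  let name := run_dir_name
  let bench_ok := pvPaperBenchmarkPrefixesA.any (fun pfx =>
    name == pfx || PySem.Str.startswith name (pfx ++ ":") || PySem.Str.startswith name (pfx ++ ","))
  if !bench_ok then false
  else pvPaperModelSlugsA.any (fun slug => PySem.Str.isIn slug name)

-- ===== PORT B =====
def pvPaperModelSlugsB : List String :=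
  ["eleutherai_pythia-2.8b-v0", "eleutherai_pythia-6.9b", "lmsys_vicuna-7b-v1.3",
   "qwen_qwen2.5-7b-instruct-turbo", "openai_gpt-oss-20b"]

def pvPaperBenchmarkPrefixesB : List String :=
  ["boolq", "civil_comments", "entity_data_imputation", "entity_matching", "gsm", "imdb",
   "lsat_qa", "mmlu", "narrative_qa", "narrativeqa", "quac", "synthetic_reasoning",
   "synthetic_reasoning_natural", "sythetic_reasoning_natural", "truthful_qa", "wikifact",
   "commonsense", "legalbench", "math", "med_qa", "natural_qa", "wmt_14", "ifeval",
   "mmlu_pro", "bbq"]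

-- _BENCH_SET = set(_PAPER_BENCHMARK_PREFIXES)
def pvBenchSetB : PySem.Set (List Char) :=
  PySem.Set.ofList (pvPaperBenchmarkPrefixesB.map String.toList)

-- B's loop: the name up to the first ':' or ',', or the whole name if neither occurs
def pvBenchTokenB : List Char → List Char
  | [] => []
  | c :: cs => if c == ':' || c == ',' then [] else c :: pvBenchTokenB cs

def path_matches_paper_scope_py_alt (run_dir_name : String) : Bool :=
  let token := pvBenchTokenB run_dir_name.toList
  if PySem.Set.contains pvBenchSetB token then
    pvPaperModelSlugsB.any (fun slug => PySem.Str.isIn slug run_dir_name)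
  else false

-- ===== PRECONDITION & SPEC =====
def Spec_path_matches_paper_scope_py (run_dir_name : String) (out : Bool) : Prop := out = path_matches_paper_scope_py_alt run_dir_name
instance (run_dir_name : String) (out : Bool) : Decidable (Spec_path_matches_paper_scope_py run_dir_name out) := by unfold Spec_path_matches_paper_scope_py; infer_instance

-- ===== CLAIM (what is proved, stated in full; the proofs are below) =====
def Claim_equal_path_matches_paper_scope_py : Prop := ∀ (run_dir_name : String), Dom_path_matches_paper_scope_py run_dir_name → Spec_path_matches_paper_scope_py run_dir_name (path_matches_paper_scope_py run_dir_name)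

-- ===== LEMMAS AND PROOFS =====

-- The token equals q exactly when the name is q, or q followed by ':' or ','.
theorem pvTokenKey (q : List Char) (hq : ∀ c ∈ q, (c == ':' || c == ',') = false) :
    ∀ l : List Char,
      (pvBenchTokenB l = q ↔ (l = q ∨ (q ++ [':']) <+: l ∨ (q ++ [',']) <+: l)) := by
  induction q with
  | nil =>
    intro l
    cases l with
    | nil => simp [pvBenchTokenB]
    | cons c cs =>
      simp only [pvBenchTokenB, List.nil_append]
      by_cases hc : (c == ':' || c == ',') = true
      · rw [if_pos hc]
        rcases Bool.or_eq_true_iff.mp hc with h | h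
        · simp [beq_iff_eq.mp h, List.cons_prefix_cons]
        · simp [beq_iff_eq.mp h, List.cons_prefix_cons]
      · rw [if_neg hc]
        simp only [Bool.or_eq_true, beq_iff_eq, not_or] at hc
        constructor
        · intro h; exact absurd h (by simp)
        · rintro (h | h | h)
          · exact absurd h (by simp)
          · rw [List.cons_prefix_cons] at h; exact absurd h.1.symm hc.1
          · rw [List.cons_prefix_cons] at h; exact absurd h.1.symm hc.2
  | cons a q' ih =>
    intro l
    have ha' : (a == ':' || a == ',') = false := hq a (List.mem_cons_self ..)
    have hq' : ∀ c ∈ q', (c == ':' || c == ',') = false := fun c hc => hq c (List.mem_cons_of_mem _ hc)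
    have ha : ¬a = ':' ∧ ¬a = ',' := by
      simpa only [Bool.or_eq_false_iff, beq_eq_false_iff_ne, ne_eq] using ha'
    cases l with
    | nil => simp [pvBenchTokenB]
    | cons c cs =>
      simp only [pvBenchTokenB]
      by_cases hc : (c == ':' || c == ',') = true
      · rw [if_pos hc]
        have hca : ¬c = a := by
          rcases Bool.or_eq_true_iff.mp hc with h | h <;> rw [beq_iff_eq.mp h]
          · exact fun h' => ha.1 h'.symm
          · exact fun h' => ha.2 h'.symm
        constructor
        · intro h; exact absurd h (by simp)
        · rintro (h | h | h)
          · exact absurd ((List.cons.injEq ..).mp h).1 hca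
          · rw [List.cons_append, List.cons_prefix_cons] at h; exact absurd h.1.symm hca
          · rw [List.cons_append, List.cons_prefix_cons] at h; exact absurd h.1.symm hca
      · rw [if_neg hc]
        constructor
        · intro h
          have h1 := (List.cons.injEq ..).mp h
          rcases (ih hq' cs).mp h1.2 with h2 | h2 | h2
          · exact Or.inl (by rw [h1.1, h2])
          · exact Or.inr (Or.inl (by rw [List.cons_append, List.cons_prefix_cons]; exact ⟨h1.1.symm, h2⟩))
          · exact Or.inr (Or.inr (by rw [List.cons_append, List.cons_prefix_cons]; exact ⟨h1.1.symm, h2⟩))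
        · rintro (h | h | h)
          · have h1 := (List.cons.injEq ..).mp h
            rw [h1.1, (ih hq' cs).mpr (Or.inl h1.2)]
          · rw [List.cons_append, List.cons_prefix_cons] at h
            rw [h.1, (ih hq' cs).mpr (Or.inr (Or.inl h.2))]
          · rw [List.cons_append, List.cons_prefix_cons] at h
            rw [h.1, (ih hq' cs).mpr (Or.inr (Or.inr h.2))]

-- One prefix: A's three-way test equals B's token comparison.
theorem pvOnePrefix (p n : String) (hp : ∀ c ∈ p.toList, (c == ':' || c == ',') = false) :
    (n == p || PySem.Str.startswith n (p ++ ":") || PySem.Str.startswith n (p ++ ",")) =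
      (pvBenchTokenB n.toList == p.toList) := by
  have hcolon : (":" : String).toList = [':'] := rfl
  have hcomma : ("," : String).toList = [','] := rfl
  rw [Bool.eq_iff_iff]
  simp only [Bool.or_eq_true, beq_iff_eq, PySem.Str.startswith_eq, PySem.Chars.startswith_iff,
    String.toList_append, hcolon, hcomma]
  rw [pvTokenKey p.toList hp n.toList]
  constructor
  · rintro ((h | h) | h)
    · exact Or.inl (String.ext_iff.mp h)
    · exact Or.inr (Or.inl h)
    · exact Or.inr (Or.inr h)
  · rintro (h | h | h)
    · exact Or.inl (Or.inl (String.ext_iff.mpr h))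
    · exact Or.inl (Or.inr h)
    · exact Or.inr h

-- A's any-loop over a list of delimiter-free prefixes is B's contains-test on the token.
theorem pvBenchAny (ps : List String)
    (hp : ∀ p ∈ ps, ∀ c ∈ p.toList, (c == ':' || c == ',') = false) (n : String) :
    ps.any (fun pfx =>
        n == pfx || PySem.Str.startswith n (pfx ++ ":") || PySem.Str.startswith n (pfx ++ ",")) =
      (ps.map String.toList).contains (pvBenchTokenB n.toList) := by
  induction ps with
  | nil => rfl
  | cons p ps ih =>
    simp only [List.any_cons, List.map, List.contains_cons]
    rw [pvOnePrefix p n (hp p (List.mem_cons_self ..)),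
      ih (fun q hq => hp q (List.mem_cons_of_mem _ hq))]

-- ===== VERDICT (by name: the statement is the Claim_ definition above) =====
set_option maxRecDepth 4096 in
theorem path_matches_paper_scope_py_spec : Claim_equal_path_matches_paper_scope_py := by
  intro n _
  unfold Spec_path_matches_paper_scope_py path_matches_paper_scope_py path_matches_paper_scope_py_alt
  have hset : pvBenchSetB = pvPaperBenchmarkPrefixesB.map String.toList := by rfl
  have hAB : pvPaperBenchmarkPrefixesA = pvPaperBenchmarkPrefixesB := rfl
  have hall : pvPaperBenchmarkPrefixesA.all
      (fun p => p.toList.all (fun c => !(c == ':' || c == ','))) = true := by rfl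
  have hp : ∀ p ∈ pvPaperBenchmarkPrefixesA, ∀ c ∈ p.toList, (c == ':' || c == ',') = false := by
    intro p hpm c hcm
    have h1 := List.all_eq_true.mp hall p hpm
    have h2 := List.all_eq_true.mp h1 c hcm
    simpa using h2
  have hbench := pvBenchAny pvPaperBenchmarkPrefixesA hp n
  dsimp only
  rw [hbench, hAB, ← hset, PySem.Set.contains_eq_listContains]
  cases List.contains pvBenchSetB (pvBenchTokenB n.toList) <;>
    simp [pvPaperModelSlugsA, pvPaperModelSlugsB]
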